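-- pv_equiv track=rewrite | github.com/EsmerlynG/part04-38_grade_statistics | src/grade_statistics.py | pass_grades
-- ===== SOURCE A (Python) =====
-- def total_points(points_list, e_points_list):
--     total_p_list = []
--     i = 0
--     for num in points_list:
--         total_p_list.append(num + e_points_list[i])
--         i += 1
--     return total_p_list
--
-- def grades(t_points_list):
--     grade_list = []
--     for points in t_points_list:
--         if 28 <= points <= 30:
--             grade_list.append(5)
--         elif 24 <= points <= 27:
--             grade_list.append(4)
--         elif 21 <= points <= 23:
--             grade_list.append(3)
--         elif 18 <= points <= 20:
--             grade_list.append(2)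
--         elif 15 <= points <= 17:
--             grade_list.append(1)
--         else:
--             grade_list.append(0)
--     return grade_list
--
-- def pass_grades(points_list, e_points_list):
--
--     i = 0
--     passing_list = []
--
--     for point in points_list:
--         if point < 10:
--             points_list[i] = 0
--             e_points_list[i] = 0
--         i += 1
--     passing_list = total_points(points_list, e_points_list)
--     return grades(passing_list)
-- ===== SOURCE B (Python) =====
-- def pass_grades(points_list, e_points_list):
--     grade_list = []
--     for i in range(len(points_list)):
--         if points_list[i] < 10:
--             points_list[i] = 0
--             e_points_list[i] = 0
--         total = points_list[i] + e_points_list[i]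
--         if 28 <= total <= 30:
--             g = 5
--         elif 24 <= total <= 27:
--             g = 4
--         elif 21 <= total <= 23:
--             g = 3
--         elif 18 <= total <= 20:
--             g = 2
--         elif 15 <= total <= 17:
--             g = 1
--         else:
--             g = 0
--         grade_list.append(g)
--     return grade_list
-- ===== Notes on version B (the rewrite author's own statement) =====
-- stated objective: simpler
-- what changed: Replaces the three-pass pipeline (mutation loop + total_points helper building an intermediate totals list + grades helper) with one index-based loop that zeroes, totals and grades each entry inline, with no helpers and no intermediate list.
import Mathlib
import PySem

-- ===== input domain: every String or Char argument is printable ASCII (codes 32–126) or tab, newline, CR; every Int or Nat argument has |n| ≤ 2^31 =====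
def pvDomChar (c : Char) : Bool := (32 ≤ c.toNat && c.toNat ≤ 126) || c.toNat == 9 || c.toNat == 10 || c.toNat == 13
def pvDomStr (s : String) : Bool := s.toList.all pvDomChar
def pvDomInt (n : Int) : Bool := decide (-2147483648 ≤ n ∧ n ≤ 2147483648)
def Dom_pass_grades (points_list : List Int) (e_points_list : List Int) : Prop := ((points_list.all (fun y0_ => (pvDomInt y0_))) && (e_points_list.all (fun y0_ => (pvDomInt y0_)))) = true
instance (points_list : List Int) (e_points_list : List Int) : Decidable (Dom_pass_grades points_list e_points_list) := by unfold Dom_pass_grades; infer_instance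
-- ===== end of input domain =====

-- B fuses A's three passes (mutation loop, total_points, grades) into one inline loop: simpler, no helpers,
-- no intermediate totals list. Equivalence is about the RETURN value; both Pythons also mutate both argument
-- lists in place in the same way.

-- ===== PORT A =====
-- first loop of pass_grades: zero out points_list[i] and e_points_list[i] where points_list[i] < 10
-- (the [] case for e with p nonempty is Python's IndexError region, excluded by Pre_)
def pyZeroLow : List Int → List Int → List Int × List Int
  | [], e => ([], e)
  | x :: xs, [] => (x :: xs, [])
  | x :: xs, y :: ys =>
    if x < 10 then (0 :: (pyZeroLow xs ys).1, 0 :: (pyZeroLow xs ys).2)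
    else (x :: (pyZeroLow xs ys).1, y :: (pyZeroLow xs ys).2)

-- helper total_points: elementwise sum indexed by i (short e = IndexError, excluded by Pre_)
def pyTotalPoints : List Int → List Int → List Int
  | [], _ => []
  | _ :: _, [] => []
  | x :: xs, y :: ys => (x + y) :: pyTotalPoints xs ys

-- helper grades: the if/elif ladder
def pyGrades : List Int → List Int
  | [] => []
  | p :: rest =>
    (if 28 ≤ p ∧ p ≤ 30 then (5 : Int)
     else if 24 ≤ p ∧ p ≤ 27 then 4
     else if 21 ≤ p ∧ p ≤ 23 then 3
     else if 18 ≤ p ∧ p ≤ 20 then 2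
     else if 15 ≤ p ∧ p ≤ 17 then 1
     else 0) :: pyGrades rest

def pass_grades (points_list : List Int) (e_points_list : List Int) : List Int :=
  pyGrades (pyTotalPoints (pyZeroLow points_list e_points_list).1
                          (pyZeroLow points_list e_points_list).2)

-- ===== PORT B =====
-- B's single index loop, walking both lists in step (short e = IndexError, excluded by Pre_)
def altLoop : List Int → List Int → List Int
  | [], _ => []
  | _ :: _, [] => []
  | x :: xs, y :: ys =>
    let px : Int := if x < 10 then 0 else x
    let py : Int := if x < 10 then 0 else y
    let total := px + py
    let g : Int :=
      if 28 ≤ total ∧ total ≤ 30 then 5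
      else if 24 ≤ total ∧ total ≤ 27 then 4
      else if 21 ≤ total ∧ total ≤ 23 then 3
      else if 18 ≤ total ∧ total ≤ 20 then 2
      else if 15 ≤ total ∧ total ≤ 17 then 1
      else 0
    g :: altLoop xs ys

def pass_grades_alt (points_list : List Int) (e_points_list : List Int) : List Int :=
  altLoop points_list e_points_list

-- ===== PRECONDITION & SPEC =====
-- A raises IndexError (in the zeroing loop or in total_points) whenever e_points_list is
-- shorter than points_list; exactly those inputs are excluded.
def Pre_pass_grades (points_list : List Int) (e_points_list : List Int) : Prop :=
  points_list.length ≤ e_points_list.length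
instance (points_list : List Int) (e_points_list : List Int) : Decidable (Pre_pass_grades points_list e_points_list) := by unfold Pre_pass_grades; infer_instance
def pvWitness_pass_grades : List Int × List Int := ([5, 20, 12], [3, 9, 4])

def Spec_pass_grades (points_list : List Int) (e_points_list : List Int) (out : List Int) : Prop := out = pass_grades_alt points_list e_points_list
instance (points_list : List Int) (e_points_list : List Int) (out : List Int) : Decidable (Spec_pass_grades points_list e_points_list out) := by unfold Spec_pass_grades; infer_instance

-- ===== CLAIM (what is proved, stated in full; the proofs are below) =====
def Claim_equal_pass_grades : Prop := ∀ (points_list : List Int) (e_points_list : List Int), Dom_pass_grades points_list e_points_list → Pre_pass_grades points_list e_points_list → Spec_pass_grades points_list e_points_list (pass_grades points_list e_points_list)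

-- ===== LEMMAS AND PROOFS =====
theorem pass_grades_eq_alt : ∀ (p e : List Int), p.length ≤ e.length →
    pass_grades p e = pass_grades_alt p e := by
  intro p
  induction p with
  | nil => intro e _; rfl
  | cons x xs ih =>
    intro e hlen
    cases e with
    | nil => simp at hlen
    | cons y ys =>
      simp only [List.length_cons, Nat.add_le_add_iff_right] at hlen
      have ihe := ih ys hlen
      simp only [pass_grades, pass_grades_alt, pyZeroLow, altLoop] at *
      by_cases h : x < 10 <;>
        simp only [h, if_true, if_false, pyTotalPoints, pyGrades, ihe]

-- ===== VERDICT (by name: the statement is the Claim_ definition above) =====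
theorem pass_grades_spec : Claim_equal_pass_grades := by
  intro p e _ hpre
  exact pass_grades_eq_alt p e hpre
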